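-- pv_equiv track=rewrite | github.com/danielhuf/INF1026 | P1/Av1_DANIELHUF_1920468_Q1.py | criaDicPaisComemoracao
-- ===== SOURCE A (Python) =====
-- def criaDicPaisComemoracao(tupla):
--     novo={}
--     for (pais,comemoracao,data) in tupla:
--         dicAux=novo.get(pais,{})
--         lAux=dicAux.get(data,[])
--         lAux.append(comemoracao)
--         dicAux[data]=lAux
--         novo[pais]=dicAux
--     return novo
-- ===== SOURCE B (Python) =====
-- def criaDicPaisComemoracao(tupla):
--     # Pass 1: flat dict keyed by (pais, data), lists in input order.
--     flat = {}
--     for (pais, comemoracao, data) in tupla: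
--         flat[(pais, data)] = flat.get((pais, data), []) + [comemoracao]
--     # Pass 2: split the flat keys into the nested dict.
--     novo = {}
--     for ((pais, data), lista) in flat.items():
--         dicAux = novo.get(pais, {})
--         dicAux[data] = lista
--         novo[pais] = dicAux
--     return novo
-- ===== Notes on version B (the rewrite author's own statement) =====
-- stated objective: alternative
-- what changed: Instead of building the nested dict incrementally (fetching and re-inserting an inner dict per element), B first groups everything into one flat dict keyed by the (pais, data) tuple in a single pass, then splits those flat keys into the nested dict in a second pass.
import Mathlib
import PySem

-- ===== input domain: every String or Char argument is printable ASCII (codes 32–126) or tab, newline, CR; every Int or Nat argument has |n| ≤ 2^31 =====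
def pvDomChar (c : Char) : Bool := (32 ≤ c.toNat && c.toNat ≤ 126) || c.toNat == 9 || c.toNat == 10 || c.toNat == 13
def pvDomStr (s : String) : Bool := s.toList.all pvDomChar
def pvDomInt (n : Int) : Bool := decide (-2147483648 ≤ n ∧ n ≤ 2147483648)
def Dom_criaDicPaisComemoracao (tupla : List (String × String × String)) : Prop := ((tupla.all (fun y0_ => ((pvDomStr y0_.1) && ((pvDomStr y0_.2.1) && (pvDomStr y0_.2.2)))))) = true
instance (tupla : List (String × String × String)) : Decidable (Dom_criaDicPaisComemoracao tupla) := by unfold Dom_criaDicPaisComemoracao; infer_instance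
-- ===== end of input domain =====

-- B groups into a flat dict keyed by the (pais, data) tuple in one pass, then splits those
-- flat keys into the nested dict in a second pass; A builds the nested dict incrementally.

-- ===== PORT A =====
-- literal port of A: one loop, nested dict built per element via get-with-default + insert
def criaDicPaisComemoracao (tupla : List (String × String × String)) : List (String × List (String × List String)) :=
  ((tupla.foldl (fun novo x =>
      let dicAux := novo.getD x.1 PySem.Dict.empty
      let lAux := dicAux.getD x.2.2 []
      novo.insert x.1 (dicAux.insert x.2.2 (lAux ++ [x.2.1])))
    PySem.Dict.empty)).items.map (fun kv => (kv.1, kv.2.items))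

-- ===== PORT B =====
-- pass 1 of Source B: flat dict keyed by (pais, data)
def pvFlat (tupla : List (String × String × String)) : PySem.Dict (String × String) (List String) :=
  tupla.foldl (fun d x => d.insert (x.1, x.2.2) (d.getD (x.1, x.2.2) [] ++ [x.2.1])) PySem.Dict.empty

-- pass 2 of Source B: one flat item into the nested dict
def pvSplit (novo : PySem.Dict String (PySem.Dict String (List String)))
    (kv : (String × String) × List String) : PySem.Dict String (PySem.Dict String (List String)) :=
  novo.insert kv.1.1 ((novo.getD kv.1.1 PySem.Dict.empty).insert kv.1.2 kv.2)

def criaDicPaisComemoracao_alt (tupla : List (String × String × String)) : List (String × List (String × List String)) :=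
  (((pvFlat tupla).items.foldl pvSplit PySem.Dict.empty)).items.map (fun kv => (kv.1, kv.2.items))

-- ===== PRECONDITION & SPEC =====
def Spec_criaDicPaisComemoracao (tupla : List (String × String × String)) (out : List (String × List (String × List String))) : Prop := out = criaDicPaisComemoracao_alt tupla
instance (tupla : List (String × String × String)) (out : List (String × List (String × List String))) : Decidable (Spec_criaDicPaisComemoracao tupla out) := by unfold Spec_criaDicPaisComemoracao; infer_instance

-- ===== CLAIM (what is proved, stated in full; the proofs are below) =====
def Claim_equal_criaDicPaisComemoracao : Prop := ∀ (tupla : List (String × String × String)), Dom_criaDicPaisComemoracao tupla → Spec_criaDicPaisComemoracao tupla (criaDicPaisComemoracao tupla)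

-- ===== LEMMAS AND PROOFS =====

-- "set the nested entry (p, da) to v" — what one pvSplit step (and one A step) performs
def pvNSet (N : PySem.Dict String (PySem.Dict String (List String))) (p da : String) (v : List String) :
    PySem.Dict String (PySem.Dict String (List String)) :=
  N.insert p ((N.getD p PySem.Dict.empty).insert da v)

-- nested lookup
def pvNGet (N : PySem.Dict String (PySem.Dict String (List String))) (p da : String) : List String :=
  (N.getD p PySem.Dict.empty).getD da []

-- last-match lookup in an association list (later pairs win)
def pvLookR {κ ν : Type} [BEq κ] : List (κ × ν) → κ → Option ν
  | [], _ => none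
  | (k, v) :: l, key =>
    match pvLookR l key with
    | some w => some w
    | none => if k == key then some v else none

theorem pvSplit_eq_nset (N : PySem.Dict String (PySem.Dict String (List String)))
    (kv : (String × String) × List String) : pvSplit N kv = pvNSet N kv.1.1 kv.1.2 kv.2 := rfl

theorem pvNGet_nset (N : PySem.Dict String (PySem.Dict String (List String)))
    (p' da' p da : String) (w : List String) :
    pvNGet (pvNSet N p' da' w) p da = if (p', da') = (p, da) then w else pvNGet N p da := by
  unfold pvNGet pvNSet
  rw [PySem.Dict.getD_insert]
  by_cases hp : p = p'
  · subst hp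
    rw [if_pos rfl, PySem.Dict.getD_insert]
    by_cases hd : da = da'
    · subst hd
      rw [if_pos rfl, if_pos rfl]
    · rw [if_neg hd, if_neg (fun h => hd ((congrArg Prod.snd h).symm))]
  · rw [if_neg hp, if_neg (fun h => hp ((congrArg Prod.fst h).symm))]

theorem pvNGet_foldl (l : List ((String × String) × List String))
    (N : PySem.Dict String (PySem.Dict String (List String))) (p da : String) :
    pvNGet (l.foldl pvSplit N) p da = (pvLookR l (p, da)).getD (pvNGet N p da) := by
  induction l generalizing N with
  | nil => rfl
  | cons x l ih =>
    obtain ⟨⟨p', da'⟩, w⟩ := x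
    simp only [List.foldl_cons, ih, pvSplit_eq_nset, pvNGet_nset, pvLookR]
    cases h : pvLookR l ((p, da) : String × String) with
    | some u => simp
    | none =>
      by_cases he : (p', da') = ((p, da) : String × String)
      · simp [he]
      · simp [he, beq_iff_eq]

theorem pvLookR_none {κ ν : Type} [BEq κ] [LawfulBEq κ] (l : List (κ × ν)) (key : κ)
    (h : key ∉ l.map Prod.fst) : pvLookR l key = none := by
  induction l with
  | nil => rfl
  | cons x l ih =>
    simp only [List.map_cons, List.mem_cons, not_or] at h
    simp [pvLookR, ih h.2, beq_iff_eq, Ne.symm h.1]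

theorem pvLookR_eq_get? {κ ν : Type} [BEq κ] [LawfulBEq κ] (l : List (κ × ν)) (key : κ)
    (h : (l.map Prod.fst).Nodup) : pvLookR l key = (PySem.Dict.mk l).get? key := by
  induction l with
  | nil => simp [pvLookR, PySem.Dict.get?]
  | cons x l ih =>
    obtain ⟨k, v⟩ := x
    simp only [List.map_cons, List.nodup_cons] at h
    rw [PySem.Dict.get?_mk_cons]
    by_cases he : k = key
    · subst he
      rw [pvLookR, pvLookR_none l k h.1]
      simp
    · rw [pvLookR, ih h.2]
      cases (PySem.Dict.mk l).get? key <;> simp [he]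

-- two in-place (or one in-place, one appending) inserts at distinct keys commute when the
-- first key is already present
theorem pv_insert_insert_comm {κ ν : Type} [BEq κ] [LawfulBEq κ] (d : PySem.Dict κ ν)
    (k k' : κ) (v w : ν) (hk : d.contains k = true) (hne : k ≠ k') :
    (d.insert k v).insert k' w = (d.insert k' w).insert k v := by
  apply PySem.Dict.ext
  have hck' : (d.insert k' w).contains k = true := by
    rw [PySem.Dict.contains_insert, hk]; simp
  cases hc' : d.contains k' with
  | true =>
    have hck : (d.insert k v).contains k' = true := by
      rw [PySem.Dict.contains_insert, hc']; simp
    rw [PySem.Dict.items_insert_of_contains _ _ hck,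
        PySem.Dict.items_insert_of_contains _ _ hck',
        PySem.Dict.items_insert_of_contains _ _ hc',
        PySem.Dict.items_insert_of_contains _ _ hk,
        List.map_map, List.map_map]
    apply List.map_congr_left
    intro q _
    simp only [Function.comp]
    by_cases h1 : q.1 = k
    · simp [h1, beq_iff_eq, hne]
    · by_cases h2 : q.1 = k' <;> simp [h1, h2, beq_iff_eq, Ne.symm hne]
  | false =>
    have hck : (d.insert k v).contains k' = false := by
      rw [PySem.Dict.contains_insert, hc']
      simp [Ne.symm hne]
    rw [PySem.Dict.items_insert_of_not_contains _ _ hck,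
        PySem.Dict.items_insert_of_contains _ _ hk,
        PySem.Dict.items_insert_of_contains _ _ hck',
        PySem.Dict.items_insert_of_not_contains _ _ hc',
        List.map_append]
    simp [Ne.symm hne]

-- overwriting the same nested slot twice keeps only the last value
theorem pvNSet_nset (N : PySem.Dict String (PySem.Dict String (List String))) (p da : String)
    (w v : List String) : pvNSet (pvNSet N p da w) p da v = pvNSet N p da v := by
  unfold pvNSet
  rw [PySem.Dict.getD_insert_self, PySem.Dict.insert_insert_self, PySem.Dict.insert_insert_self]

-- a nested set at (p, da) commutes with folding pvSplit over items that never touch (p, da),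
-- provided the slot (p, da) already exists
theorem pv_fold_nset_comm (l : List ((String × String) × List String))
    (N : PySem.Dict String (PySem.Dict String (List String))) (p da : String) (v : List String)
    (hmem : ((p, da) : String × String) ∉ l.map Prod.fst)
    (hp : N.contains p = true) (hda : (N.getD p PySem.Dict.empty).contains da = true) :
    l.foldl pvSplit (pvNSet N p da v) = pvNSet (l.foldl pvSplit N) p da v := by
  induction l generalizing N with
  | nil => rfl
  | cons x l ih =>
    obtain ⟨⟨p₂, da₂⟩, w₂⟩ := x
    simp only [List.map_cons, List.mem_cons, not_or] at hmem
    have hkey : ((p₂, da₂) : String × String) ≠ (p, da) := Ne.symm hmem.1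
    have hstep : pvSplit (pvNSet N p da v) ((p₂, da₂), w₂) =
        pvNSet (pvSplit N ((p₂, da₂), w₂)) p da v := by
      by_cases hpp : p₂ = p
      · subst hpp
        have hdd : da₂ ≠ da := by
          intro h; exact hkey (by rw [h])
        simp only [pvSplit, pvNSet, PySem.Dict.getD_insert_self,
          PySem.Dict.insert_insert_self]
        congr 1
        exact pv_insert_insert_comm _ da da₂ v w₂ hda (Ne.symm hdd)
      · simp only [pvSplit, pvNSet]
        rw [PySem.Dict.getD_insert, if_neg hpp, PySem.Dict.getD_insert, if_neg (Ne.symm hpp)]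
        exact pv_insert_insert_comm N p p₂ _ _ hp (Ne.symm hpp)
    rw [List.foldl_cons, hstep, List.foldl_cons]
    apply ih _ hmem.2
    · rw [pvSplit, PySem.Dict.contains_insert, hp]; simp
    · by_cases hpp : p₂ = p
      · subst hpp
        rw [pvSplit, PySem.Dict.getD_insert_self, PySem.Dict.contains_insert, hda]; simp
      · rw [pvSplit, PySem.Dict.getD_insert, if_neg (Ne.symm hpp)]; exact hda

-- a map that replaces at a key no pair has is the identity
theorem pv_map_replace_id {κ ν : Type} [BEq κ] [LawfulBEq κ] (l : List (κ × ν)) (key : κ) (v : ν)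
    (h : key ∉ l.map Prod.fst) :
    l.map (fun q => if q.1 == key then (key, v) else q) = l := by
  induction l with
  | nil => rfl
  | cons x l ih =>
    simp only [List.map_cons, List.mem_cons, not_or] at h
    rw [List.map_cons, ih h.2, if_neg (by simp [beq_iff_eq, Ne.symm h.1])]

-- replacing the value at an existing flat key then splitting = splitting then one nested set
theorem pv_fold_replace (l : List ((String × String) × List String))
    (N : PySem.Dict String (PySem.Dict String (List String))) (p da : String) (v : List String)
    (hmem : ((p, da) : String × String) ∈ l.map Prod.fst)
    (hnd : (l.map Prod.fst).Nodup) :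
    (l.map (fun q => if q.1 == ((p, da) : String × String) then (((p, da) : String × String), v) else q)).foldl
      pvSplit N = pvNSet (l.foldl pvSplit N) p da v := by
  induction l generalizing N with
  | nil => simp at hmem
  | cons x l ih =>
    obtain ⟨k, w⟩ := x
    simp only [List.map_cons, List.nodup_cons] at hnd
    by_cases hk : k = ((p, da) : String × String)
    · subst hk
      have hrest : ((p, da) : String × String) ∉ l.map Prod.fst := hnd.1
      rw [List.map_cons, if_pos (by simp), pv_map_replace_id l _ v hrest,
          List.foldl_cons, List.foldl_cons]
      have h1 : pvSplit N (((p, da) : String × String), v) = pvNSet N p da v := rfl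
      have h2 : pvSplit N (((p, da) : String × String), w) = pvNSet N p da w := rfl
      rw [h1, h2, ← pvNSet_nset N p da w v]
      apply pv_fold_nset_comm l _ p da v hrest
      · exact PySem.Dict.contains_insert_self _ _ _
      · rw [pvNSet, PySem.Dict.getD_insert_self]
        exact PySem.Dict.contains_insert_self _ _ _
    · have hmem' : ((p, da) : String × String) ∈ l.map Prod.fst := by
        simp only [List.map_cons, List.mem_cons] at hmem
        rcases hmem with h | h
        · exact absurd h.symm hk
        · exact h
      rw [List.map_cons, if_neg (by simp [beq_iff_eq, hk]), List.foldl_cons, List.foldl_cons]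
      exact ih _ hmem' hnd.2

-- building the nested dict from a flat dict
def pvBuild (d : PySem.Dict (String × String) (List String)) :
    PySem.Dict String (PySem.Dict String (List String)) :=
  d.items.foldl pvSplit PySem.Dict.empty

theorem pv_mk_items {κ ν : Type} [BEq κ] (d : PySem.Dict κ ν) : PySem.Dict.mk d.items = d := rfl

-- the two nested lookups on pvBuild d agree with the flat lookup
theorem pvNGet_build (d : PySem.Dict (String × String) (List String)) (p da : String)
    (hnd : d.keys.Nodup) :
    pvNGet (pvBuild d) p da = d.getD ((p, da) : String × String) [] := by
  have hnd' : (d.items.map Prod.fst).Nodup := hnd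
  rw [pvBuild, pvNGet_foldl, pvLookR_eq_get? _ _ hnd', pv_mk_items]
  have : pvNGet PySem.Dict.empty p da = [] := by
    rw [pvNGet, PySem.Dict.getD_empty, PySem.Dict.getD_empty]
  rw [this, PySem.Dict.getD_eq_get?_getD]

-- key commuting step: inserting into the flat dict then building = building then one nested set
theorem pvBuild_insert (d : PySem.Dict (String × String) (List String)) (p da : String)
    (v : List String) (hnd : d.keys.Nodup) :
    pvBuild (d.insert ((p, da) : String × String) v) = pvNSet (pvBuild d) p da v := by
  cases hc : d.contains ((p, da) : String × String) with
  | false =>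
    rw [pvBuild, PySem.Dict.items_insert_of_not_contains _ _ hc, List.foldl_append]
    rfl
  | true =>
    rw [pvBuild, PySem.Dict.items_insert_of_contains _ _ hc, pvBuild]
    exact pv_fold_replace d.items PySem.Dict.empty p da v
      ((PySem.Dict.contains_iff_mem_keys _ _).mp hc) hnd

-- main loop invariant: A's fold over the rest of the input, started from the nested dict
-- built from the current flat dict, equals building from B's flat fold
theorem pv_main (t : List (String × String × String))
    (d : PySem.Dict (String × String) (List String)) (hnd : d.keys.Nodup) :
    t.foldl (fun novo x =>
        let dicAux := novo.getD x.1 PySem.Dict.empty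
        let lAux := dicAux.getD x.2.2 []
        novo.insert x.1 (dicAux.insert x.2.2 (lAux ++ [x.2.1]))) (pvBuild d)
      = pvBuild (t.foldl (fun d x => d.insert (x.1, x.2.2) (d.getD (x.1, x.2.2) [] ++ [x.2.1])) d) := by
  induction t generalizing d with
  | nil => rfl
  | cons x t ih =>
    obtain ⟨p, c, da⟩ := x
    rw [List.foldl_cons, List.foldl_cons]
    have hstep : (pvBuild d).insert p (((pvBuild d).getD p PySem.Dict.empty).insert da
        (((pvBuild d).getD p PySem.Dict.empty).getD da [] ++ [c]))
        = pvBuild (d.insert ((p, da) : String × String) (d.getD ((p, da) : String × String) [] ++ [c])) := by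
      rw [pvBuild_insert _ _ _ _ hnd, pvNSet]
      have := pvNGet_build d p da hnd
      rw [pvNGet] at this
      rw [this]
    simp only []
    rw [hstep]
    exact ih _ (PySem.Dict.nodup_keys_insert _ _ _ hnd)

-- ===== VERDICT (by name: the statement is the Claim_ definition above) =====
theorem criaDicPaisComemoracao_spec : Claim_equal_criaDicPaisComemoracao := by
  intro tupla _
  unfold Spec_criaDicPaisComemoracao criaDicPaisComemoracao criaDicPaisComemoracao_alt pvFlat
  have h := pv_main tupla PySem.Dict.empty (by exact PySem.Dict.nodup_keys_empty)
  have hb : pvBuild (PySem.Dict.empty : PySem.Dict (String × String) (List String)) = PySem.Dict.empty := rfl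
  rw [hb] at h
  rw [h]
  rfl
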